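-- pv_equiv track=rewrite | github.com/aAbstract/z-pdf-tree | zpdf.py | _remove_key_overlaps
-- ===== SOURCE A (Python) =====
-- def _remove_key_overlaps(keys: list[str]) -> list[str]:
--     ''' Filter TOC index keys overlaps by removing child keys from the list and only leaving top level keys '''
--     keys = keys.copy()
--     keys.sort()
--     non_overlapping = []
--     for key in keys:
--         if not non_overlapping or not any(key.startswith(v) for v in non_overlapping):
--             non_overlapping.append(key)
--     return non_overlapping
-- ===== SOURCE B (Python) =====
-- def _remove_key_overlaps(keys: list[str]) -> list[str]:
--     ''' Filter TOC index keys overlaps by removing child keys from the list and only leaving top level keys '''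
--     ks = sorted(keys)
--     out = []
--     i, n = 0, len(ks)
--     while i < n:
--         h = ks[i]
--         out.append(h)
--         i += 1
--         # in sorted order, the keys prefixed by h form a contiguous block right after h
--         while i < n and ks[i].startswith(h):
--             i += 1
--     return out
-- ===== Notes on version B (the rewrite author's own statement) =====
-- stated objective: faster
-- what changed: A re-scans the whole kept list with any(key.startswith(v)) for every key; B keeps no membership structure at all: after sorting, the keys prefixed by a kept key form a contiguous block right after it, so B just walks the sorted list once, skipping each block with an inner index advance.
import Mathlib
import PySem

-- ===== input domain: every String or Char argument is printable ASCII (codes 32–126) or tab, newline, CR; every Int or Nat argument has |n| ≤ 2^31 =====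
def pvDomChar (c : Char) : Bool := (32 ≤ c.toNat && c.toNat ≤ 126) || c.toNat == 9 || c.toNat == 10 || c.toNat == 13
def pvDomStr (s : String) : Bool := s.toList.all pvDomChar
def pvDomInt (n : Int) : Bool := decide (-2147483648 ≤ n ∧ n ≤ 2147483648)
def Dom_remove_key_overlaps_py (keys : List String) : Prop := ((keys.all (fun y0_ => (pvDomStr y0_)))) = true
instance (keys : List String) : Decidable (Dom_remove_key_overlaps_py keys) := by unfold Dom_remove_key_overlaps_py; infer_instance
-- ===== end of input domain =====

-- B replaces A's per-key scan of the whole kept list by a single pass over the sorted list that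
-- skips the contiguous block of keys prefixed by each kept key; return value only, no mutation.

-- ===== PORT A =====
-- A: sort a copy, then for each key scan the whole kept list with any(key.startswith(v)).
def remove_key_overlaps_py (keys : List String) : List String :=
  (PySem.List.sorted keys (fun x => x) false).foldl
    (fun non_overlapping key =>
      if non_overlapping = [] ∨ (non_overlapping.any (fun v => PySem.Str.startswith key v)) = false
      then non_overlapping ++ [key] else non_overlapping) []

-- ===== PORT B =====
-- B: walk the sorted list once; take the current key h, then the inner while-loop advances the
-- index past the contiguous block of keys that start with h (here: dropWhile on the remainder).
def pvSkipBlocks : List String → List String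
  | [] => []
  | h :: t =>
      h :: pvSkipBlocks (t.dropWhile (fun k => PySem.Str.startswith k h))
  termination_by l => l.length
  decreasing_by
    exact Nat.lt_succ_of_le (List.length_dropWhile_le _ _)

def remove_key_overlaps_py_alt (keys : List String) : List String :=
  pvSkipBlocks (PySem.List.sorted keys (fun x => x) false)

-- ===== PRECONDITION & SPEC =====
def Spec_remove_key_overlaps_py (keys : List String) (out : List String) : Prop := out = remove_key_overlaps_py_alt keys
instance (keys : List String) (out : List String) : Decidable (Spec_remove_key_overlaps_py keys out) := by unfold Spec_remove_key_overlaps_py; infer_instance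

-- ===== CLAIM (what is proved, stated in full; the proofs are below) =====
def Claim_equal_remove_key_overlaps_py : Prop := ∀ (keys : List String), Dom_remove_key_overlaps_py keys → Spec_remove_key_overlaps_py keys (remove_key_overlaps_py keys)

-- ===== LEMMAS AND PROOFS =====

-- If v ≤ w ≤ k (code-point order on Char lists) and v is a prefix of k, then v is a prefix of w.
lemma pv_prefix_sandwich : ∀ (v w k : List Char),
    ¬ List.Lex (· < ·) w v → ¬ List.Lex (· < ·) k w → v <+: k → v <+: w := by
  intro v
  induction v with
  | nil => intro w k _ _ _; exact List.nil_prefix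
  | cons c v' ih =>
    intro w k hwv hkw hpre
    obtain ⟨r, hr⟩ := hpre
    cases w with
    | nil => exact absurd List.Lex.nil hwv
    | cons d w' =>
      cases k with
      | nil => simp at hr
      | cons e k' =>
        have hr' : c :: (v' ++ r) = e :: k' := hr
        injection hr' with hce hk'
        rcases lt_trichotomy c d with hcd | hcd | hcd
        · exact absurd (hce ▸ List.Lex.rel hcd : List.Lex (· < ·) (e :: k') (d :: w')) hkw
        · subst hcd
          have hwv' : ¬ List.Lex (· < ·) w' v' := fun h => hwv (List.Lex.cons h)
          have hkw' : ¬ List.Lex (· < ·) k' w' := by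
            subst hce; exact fun h => hkw (List.Lex.cons h)
          have := ih w' k' hwv' hkw' ⟨r, hk'⟩
          exact hce ▸ List.cons_prefix_cons.mpr ⟨rfl, this⟩
        · exact absurd (List.Lex.rel hcd) hwv

-- A's loop body, named for the lemmas below.
def pvStepA (non_overlapping : List String) (key : String) : List String :=
  if non_overlapping = [] ∨ (non_overlapping.any (fun v => PySem.Str.startswith key v)) = false
  then non_overlapping ++ [key] else non_overlapping

-- A's fold leaves the accumulator unchanged across a block of keys that all start with h ∈ acc.
lemma pv_fold_skip (h : String) : ∀ (b acc : List String), h ∈ acc →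
    (∀ x ∈ b, PySem.Str.startswith x h = true) →
    b.foldl pvStepA acc = acc := by
  intro b
  induction b with
  | nil => intro acc _ _; rfl
  | cons x b' ih =>
    intro acc hmem hall
    have hne : acc ≠ [] := List.ne_nil_of_mem hmem
    have hany : (acc.any (fun v => PySem.Str.startswith x v)) = true :=
      List.any_eq_true.mpr ⟨h, hmem, hall x List.mem_cons_self⟩
    have hx : PySem.Chars.startswith x.toList h.toList = true := by
      have := hall x List.mem_cons_self
      rwa [PySem.Str.startswith_eq] at this
    have hstep : pvStepA acc x = acc := by
      unfold pvStepA
      rw [if_neg (by simp [hne]; exact ⟨h, hmem, hx⟩)]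
    simp only [List.foldl_cons, hstep]
    exact ih acc hmem (fun y hy => hall y (List.mem_cons_of_mem _ hy))

-- Main invariant: on a sorted list whose keys are not prefixed by any accumulator element,
-- A's fold appends exactly the block-skipping traversal's output.
lemma pv_fold_eq_skip : ∀ (l acc : List String),
    l.Pairwise (· ≤ ·) →
    (∀ v ∈ acc, ∀ k ∈ l, PySem.Str.startswith k v = false) →
    l.foldl pvStepA acc = acc ++ pvSkipBlocks l := by
  intro l
  induction l using pvSkipBlocks.induct with
  | case1 => intro acc _ _; simp [pvSkipBlocks]
  | case2 h t ih =>
      intro acc hsort hnp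
      rw [List.pairwise_cons] at hsort
      have hstep : pvStepA acc h = acc ++ [h] := by
        unfold pvStepA
        by_cases hacc : acc = []
        · rw [if_pos (Or.inl hacc)]
        · rw [if_pos (Or.inr (List.any_eq_false.mpr
            (fun v hv => by
              rw [Bool.not_eq_true]
              exact hnp v hv h List.mem_cons_self)))]
      set p : String → Bool := fun k => PySem.Str.startswith k h with hp
      have htb : t = t.takeWhile p ++ t.dropWhile p := (List.takeWhile_append_dropWhile).symm
      have hskip1 : (t.takeWhile p).foldl pvStepA (acc ++ [h]) = acc ++ [h] := by
        apply pv_fold_skip h _ _ (List.mem_append_right _ (List.mem_singleton_self h))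
        intro x hx
        exact (List.mem_takeWhile_imp (p := p) (l := t) hx : p x = true)
      -- every key of the rest r is ≥ the first non-block key, hence not prefixed by h
      have hrle : ∀ k ∈ t.dropWhile p, h ≤ k := by
        intro k hk
        exact hsort.1 k ((List.dropWhile_sublist p).subset hk)
      have hrnp : ∀ k ∈ t.dropWhile p, PySem.Str.startswith k h = false := by
        intro k hk
        rcases hr : t.dropWhile p with _ | ⟨w, r'⟩
        · simp [hr] at hk
        · have hwfail : p w = false := by
            have := List.head_dropWhile_not p (l := t) (by simp [hr])
            simpa [hr] using this
          rw [Bool.eq_false_iff]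
          intro hkh
          -- h ≤ w ≤ k and h prefix of k ⇒ h prefix of w: contradiction with hwfail
          have hwmem : w ∈ t.dropWhile p := by simp [hr]
          have hhw : h ≤ w := hrle w hwmem
          have hwk : w ≤ k := by
            have hpw : (t.dropWhile p).Pairwise (fun a b : String => a ≤ b) :=
              hsort.2.sublist (List.dropWhile_sublist p)
            rw [hr, List.pairwise_cons] at hpw
            rcases (by simpa [hr] using hk : k = w ∨ k ∈ r') with hkw | hkr
            · exact le_of_eq hkw.symm
            · exact hpw.1 k hkr
          have hprefk : h.toList <+: k.toList := by
            rw [PySem.Str.startswith_eq] at hkh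
            exact (PySem.Chars.startswith_iff _ _).mp hkh
          have hnotwh : ¬ List.Lex (· < ·) w.toList h.toList := by
            intro hlex
            exact absurd (String.lt_iff_toList_lt.mpr hlex) (not_lt.mpr hhw)
          have hnotkw : ¬ List.Lex (· < ·) k.toList w.toList := by
            intro hlex
            exact absurd (String.lt_iff_toList_lt.mpr hlex) (not_lt.mpr hwk)
          have hprefw := pv_prefix_sandwich h.toList w.toList k.toList hnotwh hnotkw hprefk
          have : p w = true := by
            show PySem.Str.startswith w h = true
            rw [PySem.Str.startswith_eq]
            exact (PySem.Chars.startswith_iff _ _).mpr hprefw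
          rw [hwfail] at this
          exact Bool.false_ne_true this
      have hrec : (t.dropWhile p).foldl pvStepA (acc ++ [h]) =
          (acc ++ [h]) ++ pvSkipBlocks (t.dropWhile p) := by
        apply ih
        · exact hsort.2.sublist (List.dropWhile_sublist p)
        · intro v hv k hk
          rcases List.mem_append.mp hv with hv' | hv'
          · exact hnp v hv' k (List.mem_cons_of_mem _ ((List.dropWhile_sublist p).subset hk))
          · rw [List.mem_singleton.mp hv']
            exact hrnp k hk
      calc (h :: t).foldl pvStepA acc
          = t.foldl pvStepA (acc ++ [h]) := by rw [List.foldl_cons, hstep]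
        _ = (t.takeWhile p ++ t.dropWhile p).foldl pvStepA (acc ++ [h]) := by rw [← htb]
        _ = (t.dropWhile p).foldl pvStepA (acc ++ [h]) := by
              rw [List.foldl_append, hskip1]
        _ = (acc ++ [h]) ++ pvSkipBlocks (t.dropWhile p) := hrec
        _ = acc ++ pvSkipBlocks (h :: t) := by
              rw [pvSkipBlocks, List.append_assoc]; rfl

-- ===== VERDICT (by name: the statement is the Claim_ definition above) =====
theorem remove_key_overlaps_py_spec : Claim_equal_remove_key_overlaps_py := by
  intro keys _
  unfold Spec_remove_key_overlaps_py remove_key_overlaps_py remove_key_overlaps_py_alt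
  exact pv_fold_eq_skip (PySem.List.sorted keys (fun x => x) false) []
    (PySem.List.sorted_pairwise keys (fun x => x) : _)
    (by intro v hv; simp at hv)
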